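-- pv_equiv track=rewrite | github.com/Ag3497120/verantyx-v6 | arc/world_commands.py | sym_diag_anti
-- ===== SOURCE A (Python) =====
-- from collections import Counter, defaultdict
--
-- def _bg(g):
--     c = Counter()
--     for row in g: c.update(row)
--     return c.most_common(1)[0][0]
--
-- def _copy(g):
--     return [row[:] for row in g]
--
-- def sym_diag_anti(g):
--     bg=_bg(g); h,w=len(g),len(g[0])
--     if h!=w: return g
--     res=_copy(g)
--     for r in range(h):
--         for c in range(w):
--             mr,mc = w-1-c, h-1-r
--             if 0<=mr<h and 0<=mc<w:
--                 if res[r][c]==bg and res[mr][mc]!=bg: res[r][c]=res[mr][mc]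
--                 elif res[mr][mc]==bg and res[r][c]!=bg: res[mr][mc]=res[r][c]
--     return res
-- ===== SOURCE B (Python) =====
-- from collections import Counter
--
-- def sym_diag_anti(g):
--     cnt = Counter()
--     for row in g:
--         cnt.update(row)
--     bg = cnt.most_common(1)[0][0]
--     n = len(g)
--     if n != len(g[0]):
--         return g
--     return [[v if (c >= n or v != bg) else g[n-1-c][n-1-r]
--              for c, v in enumerate(row)]
--             for r, row in enumerate(g)]
-- ===== Notes on version B (the rewrite author's own statement) =====
-- stated objective: simpler
-- what changed: B replaces A's in-place mutation loop with its symmetric double-write elif branch by a read-only comprehension that resolves each cell directly from its anti-diagonal mirror in the original grid (keep non-bg cells, fill bg cells from the mirror).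
-- outside the precondition, e.g. on sym_diag_anti([]): A raises IndexError, B raises IndexError; on sym_diag_anti([[], []]): A raises IndexError, B raises IndexError; on sym_diag_anti([[1, 1], [1]]): A raises IndexError, B raises IndexError
import Mathlib
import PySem

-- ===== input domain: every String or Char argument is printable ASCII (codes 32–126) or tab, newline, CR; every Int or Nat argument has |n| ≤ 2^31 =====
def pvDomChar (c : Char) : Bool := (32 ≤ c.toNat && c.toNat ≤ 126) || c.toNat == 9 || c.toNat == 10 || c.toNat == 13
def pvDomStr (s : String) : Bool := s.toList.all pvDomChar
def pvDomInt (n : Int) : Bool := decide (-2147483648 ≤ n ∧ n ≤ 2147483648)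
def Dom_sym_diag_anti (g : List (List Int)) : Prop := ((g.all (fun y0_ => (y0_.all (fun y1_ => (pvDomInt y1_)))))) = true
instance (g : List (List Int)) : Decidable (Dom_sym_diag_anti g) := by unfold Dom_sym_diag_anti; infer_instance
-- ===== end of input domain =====

-- B rebuilds the grid by one read-only pass (each cell resolved directly from its anti-diagonal
-- mirror in the ORIGINAL grid) instead of A's in-place double-write mutation loop; objective: simpler.

-- ===== PORT A =====
-- _bg: Counter over all rows; most_common(1)[0][0] = first key (in insertion order) with maximal count
def pvBg (g : List (List Int)) : Int :=
  let cnt : PySem.Dict Int Int :=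
    g.foldl (fun d row => row.foldl (fun d x => d.modify x 0 (· + 1)) d) PySem.Dict.empty
  ((cnt.items.foldl (fun best kv =>
      match best with
      | none => some kv
      | some b => if b.2 < kv.2 then some kv else best) none).map Prod.fst).getD 0

-- _copy: [row[:] for row in g]
def pvCopy (g : List (List Int)) : List (List Int) :=
  g.map (fun row => PySem.List.slice row none none)

-- res[r][c] read / write (indices are in range on every admitted input, so getD's default is never used)
def pvGet2 (res : List (List Int)) (r c : Nat) : Int := (res.getD r []).getD c 0
def pvSet2 (res : List (List Int)) (r c : Nat) (v : Int) : List (List Int) :=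
  res.set r ((res.getD r []).set c v)

-- the body of A's innermost loop iteration
def pvStep (bg : Int) (h w : Nat) (res : List (List Int)) (r c : Nat) : List (List Int) :=
  let mr := w - 1 - c
  let mc := h - 1 - r
  if mr < h ∧ mc < w then
    if pvGet2 res r c = bg ∧ pvGet2 res mr mc ≠ bg then pvSet2 res r c (pvGet2 res mr mc)
    else if pvGet2 res mr mc = bg ∧ pvGet2 res r c ≠ bg then pvSet2 res mr mc (pvGet2 res r c)
    else res
  else res

def sym_diag_anti (g : List (List Int)) : List (List Int) :=
  let bg := pvBg g
  let h := g.length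
  let w := (g.headI).length
  if h ≠ w then g
  else
    (List.range h).foldl (fun res r =>
      (List.range w).foldl (fun res c => pvStep bg h w res r c) res) (pvCopy g)

-- ===== PORT B =====
def sym_diag_anti_alt (g : List (List Int)) : List (List Int) :=
  let cnt : PySem.Dict Int Int :=
    g.foldl (fun d row => row.foldl (fun d x => d.modify x 0 (· + 1)) d) PySem.Dict.empty
  let bg : Int := ((cnt.items.foldl (fun best kv =>
      match best with
      | none => some kv
      | some b => if b.2 < kv.2 then some kv else best) none).map Prod.fst).getD 0
  let n := g.length
  if n ≠ (g.headI).length then g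
  else
    (PySem.List.enumerate g).map (fun rrow =>
      (PySem.List.enumerate rrow.2).map (fun cv =>
        if (n : Int) ≤ cv.1 ∨ cv.2 ≠ bg then cv.2
        -- g[n-1-c][n-1-r]; both indices are nonnegative and in range on every admitted input
        else (g.getD (n - 1 - cv.1.toNat) []).getD (n - 1 - rrow.1.toNat) 0))

-- ===== PRECONDITION & SPEC =====
-- Pre_ excludes exactly the inputs where Python A raises: the empty grid and the grid with only
-- empty rows (Counter empty → most_common(1)[0] IndexError; g[0] IndexError), and square grids
-- with some row shorter than the grid (res[r][c] IndexError inside the loop).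
def Pre_sym_diag_anti (g : List (List Int)) : Prop :=
  g ≠ [] ∧ (∃ row ∈ g, row ≠ []) ∧
  (g.length = (g.headI).length → ∀ row ∈ g, g.length ≤ row.length)
instance (g : List (List Int)) : Decidable (Pre_sym_diag_anti g) := by
  unfold Pre_sym_diag_anti; infer_instance

def pvWitness_sym_diag_anti : List (List Int) := [[1, 2], [3, 1]]

def Spec_sym_diag_anti (g : List (List Int)) (out : List (List Int)) : Prop := out = sym_diag_anti_alt g
instance (g : List (List Int)) (out : List (List Int)) : Decidable (Spec_sym_diag_anti g out) := by unfold Spec_sym_diag_anti; infer_instance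

-- ===== CLAIM (what is proved, stated in full; the proofs are below) =====
def Claim_equal_sym_diag_anti : Prop := ∀ (g : List (List Int)), Dom_sym_diag_anti g → Pre_sym_diag_anti g → Spec_sym_diag_anti g (sym_diag_anti g)

-- ===== LEMMAS AND PROOFS =====

-- generic list-update fact
theorem pv_getD_set {α : Type} (xs : List α) (k i : Nat) (v d : α) :
    (xs.set k v).getD i d = if i = k ∧ k < xs.length then v else xs.getD i d := by
  simp only [List.getD_eq_getElem?_getD, List.getElem?_set]
  by_cases h1 : k = i
  · subst h1
    by_cases h2 : k < xs.length
    · simp [h2]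
    · simp [h2]
  · simp [h1, Ne.symm h1]

theorem pv_map_enum {α β : Type} (d : α) (f : Int × α → β) : ∀ (xs : List α) (s : Int),
    (PySem.List.enumerate xs s).map f
      = (List.range xs.length).map (fun (j : Nat) => f (s + j, xs.getD j d)) := by
  intro xs
  induction xs with
  | nil => intro s; simp [PySem.List.enumerate_nil]
  | cons x xs ih =>
    intro s
    rw [PySem.List.enumerate_cons, List.map_cons, ih (s + 1),
        List.length_cons, List.range_succ_eq_map, List.map_cons, List.map_map]
    simp only [Nat.cast_zero, add_zero, List.getD_cons_zero]
    congr 1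
    apply List.map_congr_left
    intro a _
    simp only [Function.comp_apply, List.getD_cons_succ]
    congr 2
    push_cast
    ring

-- the value every cell ends up with (n = g.length baked in)
def pvFinal (g : List (List Int)) (bg : Int) (i j : Nat) : Int :=
  if (g.getD i []).getD j 0 ≠ bg then (g.getD i []).getD j 0
  else (g.getD (g.length - 1 - j) []).getD (g.length - 1 - i) 0

-- cell (i,j) or its anti-diagonal mirror has been processed strictly before position (r,c)
def pvTouched (n r c i j : Nat) : Bool :=
  decide ((i < r ∨ (i = r ∧ j < c)) ∨ (n - 1 - j < r ∨ (n - 1 - j = r ∧ n - 1 - i < c)))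

theorem pvTouched_succ_iff (n r c i j : Nat) (hr : r < n) (hc : c < n) (hi : i < n) (hj : j < n) :
    pvTouched n r (c + 1) i j = true ↔
      (pvTouched n r c i j = true ∨ (i = r ∧ j = c) ∨ (i = n - 1 - c ∧ j = n - 1 - r)) := by
  simp only [pvTouched, decide_eq_true_eq]; omega

theorem pvTouched_rc (n r c : Nat) (hr : r < n) (hc : c < n) :
    pvTouched n r c r c = true ↔ (n - 1 - c < r ∨ (n - 1 - c = r ∧ n - 1 - r < c)) := by
  simp only [pvTouched, decide_eq_true_eq]; omega

theorem pvTouched_mir (n r c : Nat) (hr : r < n) (hc : c < n) :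
    pvTouched n r c (n - 1 - c) (n - 1 - r) = true ↔
      (n - 1 - c < r ∨ (n - 1 - c = r ∧ n - 1 - r < c)) := by
  simp only [pvTouched, decide_eq_true_eq]; omega

theorem pvTouched_row_end (n r i j : Nat) (hj : j < n) :
    pvTouched n (r + 1) 0 i j = true ↔ pvTouched n r n i j = true := by
  simp only [pvTouched, decide_eq_true_eq]; omega

theorem pvTouched_zero (n i j : Nat) : ¬ pvTouched n 0 0 i j = true := by
  simp only [pvTouched, decide_eq_true_eq]; omega

theorem pvTouched_done (n i j : Nat) (hi : i < n) : pvTouched n n 0 i j = true := by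
  simp only [pvTouched, decide_eq_true_eq]; omega

-- loop invariant of A's double loop, at the start of iteration (r,c)
def pvInv (g : List (List Int)) (bg : Int) (r c : Nat) (res : List (List Int)) : Prop :=
  res.length = g.length ∧
  (∀ i, (res.getD i []).length = (g.getD i []).length) ∧
  (∀ i j, i < g.length → j < g.length →
      pvGet2 res i j =
        if pvTouched g.length r c i j then pvFinal g bg i j else (g.getD i []).getD j 0) ∧
  (∀ i j, g.length ≤ j → pvGet2 res i j = (g.getD i []).getD j 0)

theorem pvSet2_length (res : List (List Int)) (r c : Nat) (v : Int) :
    (pvSet2 res r c v).length = res.length := by simp [pvSet2]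

theorem pvSet2_row_length (res : List (List Int)) (r c : Nat) (v : Int) (i : Nat) :
    ((pvSet2 res r c v).getD i []).length = ((res.getD i []) : List Int).length := by
  simp only [pvSet2, pv_getD_set]
  split
  · rename_i h; rw [h.1]; simp
  · rfl

theorem pvGet2_pvSet2 (res : List (List Int)) (r c : Nat) (v : Int) (i j : Nat)
    (hc : c < (res.getD r []).length) :
    pvGet2 (pvSet2 res r c v) i j =
      if i = r ∧ r < res.length ∧ j = c then v else pvGet2 res i j := by
  simp only [pvGet2, pvSet2, pv_getD_set]
  by_cases h : i = r ∧ r < res.length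
  · rw [h.1, if_pos ⟨rfl, h.2⟩, pv_getD_set]
    by_cases hj : j = c
    · rw [if_pos ⟨hj, hc⟩, if_pos ⟨rfl, h.2, hj⟩]
    · rw [if_neg (fun hx => hj hx.1), if_neg (fun hx => hj hx.2.2)]
  · rw [if_neg h, if_neg (fun hx => h ⟨hx.1, hx.2.1⟩)]

theorem pvStep_inv (g : List (List Int)) (bg : Int)
    (hrows : ∀ i, i < g.length → g.length ≤ ((g.getD i []) : List Int).length)
    (r c : Nat) (hr : r < g.length) (hc : c < g.length)
    (res : List (List Int)) (hinv : pvInv g bg r c res) :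
    pvInv g bg r (c + 1) (pvStep bg g.length g.length res r c) := by
  obtain ⟨hlen, hrowlen, hcell, hhigh⟩ := hinv
  have hmr : g.length - 1 - c < g.length := by omega
  have hmc : g.length - 1 - r < g.length := by omega
  have hmm1 : g.length - 1 - (g.length - 1 - r) = r := by omega
  have hmm2 : g.length - 1 - (g.length - 1 - c) = c := by omega
  have ha := hcell r c hr hc
  have hb := hcell (g.length - 1 - c) (g.length - 1 - r) hmr hmc
  have hTa := pvTouched_rc g.length r c hr hc
  have hTb := pvTouched_mir g.length r c hr hc
  have hsucc := fun i j hi hj => pvTouched_succ_iff g.length r c i j hr hc hi hj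
  simp only [pvStep, if_pos (And.intro hmr hmc)]
  by_cases hMD : (g.length - 1 - c < r ∨ (g.length - 1 - c = r ∧ g.length - 1 - r < c))
  · -- mirror processed earlier: both cells already hold their final value, no write happens
    have ha' : pvGet2 res r c = pvFinal g bg r c := by rw [ha, if_pos (hTa.mpr hMD)]
    have hb' : pvGet2 res (g.length - 1 - c) (g.length - 1 - r)
        = pvFinal g bg (g.length - 1 - c) (g.length - 1 - r) := by
      rw [hb, if_pos (hTb.mpr hMD)]
    rw [ha', hb']
    have hfa : pvFinal g bg r c = bg → pvFinal g bg (g.length - 1 - c) (g.length - 1 - r) = bg := by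
      intro h
      by_cases h1 : (g.getD r []).getD c 0 = bg
      · have h2 : (g.getD (g.length - 1 - c) []).getD (g.length - 1 - r) 0 = bg := by
          have e1 : pvFinal g bg r c = (g.getD (g.length - 1 - c) []).getD (g.length - 1 - r) 0 := by
            unfold pvFinal; rw [if_neg (not_not_intro h1)]
          rw [← e1]; exact h
        unfold pvFinal
        rw [if_neg (not_not_intro h2), hmm1, hmm2]
        exact h1
      · have e1 : pvFinal g bg r c = (g.getD r []).getD c 0 := by
          unfold pvFinal; rw [if_pos h1]
        rw [e1] at h; exact absurd h h1
    have hfb : pvFinal g bg (g.length - 1 - c) (g.length - 1 - r) = bg → pvFinal g bg r c = bg := by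
      intro h
      by_cases h1 : (g.getD (g.length - 1 - c) []).getD (g.length - 1 - r) 0 = bg
      · have h2 : (g.getD r []).getD c 0 = bg := by
          have e1 : pvFinal g bg (g.length - 1 - c) (g.length - 1 - r) = (g.getD r []).getD c 0 := by
            unfold pvFinal; rw [if_neg (not_not_intro h1), hmm1, hmm2]
          rw [← e1]; exact h
        unfold pvFinal; rw [if_neg (not_not_intro h2)]
        exact h1
      · have e1 : pvFinal g bg (g.length - 1 - c) (g.length - 1 - r)
            = (g.getD (g.length - 1 - c) []).getD (g.length - 1 - r) 0 := by
          unfold pvFinal; rw [if_pos h1]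
        rw [e1] at h; exact absurd h h1
    have h1 : ¬(pvFinal g bg r c = bg ∧ pvFinal g bg (g.length - 1 - c) (g.length - 1 - r) ≠ bg) := by
      rintro ⟨e1, e2⟩; exact e2 (hfa e1)
    have h2 : ¬(pvFinal g bg (g.length - 1 - c) (g.length - 1 - r) = bg ∧ pvFinal g bg r c ≠ bg) := by
      rintro ⟨e1, e2⟩; exact e2 (hfb e1)
    rw [if_neg h1, if_neg h2]
    refine ⟨hlen, hrowlen, ?_, hhigh⟩
    intro i j hi hj
    have hiff : pvTouched g.length r (c + 1) i j = true ↔ pvTouched g.length r c i j = true := by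
      rw [hsucc i j hi hj]
      constructor
      · rintro (h | ⟨e1, e2⟩ | ⟨e1, e2⟩)
        · exact h
        · subst e1; subst e2; exact hTa.mpr hMD
        · subst e1; subst e2; exact hTb.mpr hMD
      · exact Or.inl
    rw [if_congr hiff rfl rfl]
    exact hcell i j hi hj
  · -- neither cell processed yet: both still hold their original values
    have ha' : pvGet2 res r c = (g.getD r []).getD c 0 := by
      rw [ha, if_neg (fun h => hMD (hTa.mp h))]
    have hb' : pvGet2 res (g.length - 1 - c) (g.length - 1 - r)
        = (g.getD (g.length - 1 - c) []).getD (g.length - 1 - r) 0 := by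
      rw [hb, if_neg (fun h => hMD (hTb.mp h))]
    rw [ha', hb']
    have hcr : c < ((res.getD r []) : List Int).length := by
      rw [hrowlen]; exact lt_of_lt_of_le hc (hrows r hr)
    have hcm : g.length - 1 - r < ((res.getD (g.length - 1 - c) []) : List Int).length := by
      rw [hrowlen]; exact lt_of_lt_of_le hmc (hrows _ hmr)
    have hfinal_rc_eq : (g.getD r []).getD c 0 = bg →
        pvFinal g bg r c = (g.getD (g.length - 1 - c) []).getD (g.length - 1 - r) 0 := by
      intro h; unfold pvFinal; rw [if_neg (not_not_intro h)]
    have hfinal_rc_ne : (g.getD r []).getD c 0 ≠ bg → pvFinal g bg r c = (g.getD r []).getD c 0 := by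
      intro h; unfold pvFinal; rw [if_pos h]
    have hfinal_m_eq : (g.getD (g.length - 1 - c) []).getD (g.length - 1 - r) 0 = bg →
        pvFinal g bg (g.length - 1 - c) (g.length - 1 - r) = (g.getD r []).getD c 0 := by
      intro h; unfold pvFinal; rw [if_neg (not_not_intro h), hmm1, hmm2]
    have hfinal_m_ne : (g.getD (g.length - 1 - c) []).getD (g.length - 1 - r) 0 ≠ bg →
        pvFinal g bg (g.length - 1 - c) (g.length - 1 - r)
          = (g.getD (g.length - 1 - c) []).getD (g.length - 1 - r) 0 := by
      intro h; unfold pvFinal; rw [if_pos h]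
    have hgen : ∀ i j, i < g.length → j < g.length → ¬(i = r ∧ j = c) →
        ¬(i = g.length - 1 - c ∧ j = g.length - 1 - r) →
        (pvTouched g.length r (c + 1) i j = true ↔ pvTouched g.length r c i j = true) := by
      intro i j hi hj hij him
      rw [hsucc i j hi hj]
      constructor
      · rintro (h | h | h)
        · exact h
        · exact absurd h hij
        · exact absurd h him
      · exact Or.inl
    have htrc : pvTouched g.length r (c + 1) r c = true :=
      (hsucc r c hr hc).mpr (Or.inr (Or.inl ⟨rfl, rfl⟩))
    have htm : pvTouched g.length r (c + 1) (g.length - 1 - c) (g.length - 1 - r) = true :=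
      (hsucc _ _ hmr hmc).mpr (Or.inr (Or.inr ⟨rfl, rfl⟩))
    by_cases hb1 : (g.getD r []).getD c 0 = bg ∧ (g.getD (g.length - 1 - c) []).getD (g.length - 1 - r) 0 ≠ bg
    · rw [if_pos hb1]
      refine ⟨by rw [pvSet2_length, hlen], fun i => by rw [pvSet2_row_length, hrowlen], ?_, ?_⟩
      · intro i j hi hj
        rw [pvGet2_pvSet2 _ _ _ _ _ _ hcr]
        by_cases hij : i = r ∧ j = c
        · rw [if_pos ⟨hij.1, by omega, hij.2⟩, hij.1, hij.2]
          rw [if_pos htrc, hfinal_rc_eq hb1.1]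
        · rw [if_neg (fun hx => hij ⟨hx.1, hx.2.2⟩)]
          rw [hcell i j hi hj]
          by_cases him : i = g.length - 1 - c ∧ j = g.length - 1 - r
          · -- the mirror cell: untouched, and its value already equals its final value
            have hnt : ¬ pvTouched g.length r c i j = true := by
              rw [him.1, him.2]; intro h; exact hMD (hTb.mp h)
            rw [if_neg hnt, him.1, him.2, if_pos htm, hfinal_m_ne hb1.2]
          · rw [if_congr (hgen i j hi hj hij him) rfl rfl]
      · intro i j hj
        rw [pvGet2_pvSet2 _ _ _ _ _ _ hcr,
            if_neg (by rintro ⟨-, -, rfl⟩; omega)]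
        exact hhigh i j hj
    · rw [if_neg hb1]
      by_cases hb2 : (g.getD (g.length - 1 - c) []).getD (g.length - 1 - r) 0 = bg ∧ (g.getD r []).getD c 0 ≠ bg
      · rw [if_pos hb2]
        refine ⟨by rw [pvSet2_length, hlen], fun i => by rw [pvSet2_row_length, hrowlen], ?_, ?_⟩
        · intro i j hi hj
          rw [pvGet2_pvSet2 _ _ _ _ _ _ hcm]
          by_cases him : i = g.length - 1 - c ∧ j = g.length - 1 - r
          · rw [if_pos ⟨him.1, by omega, him.2⟩, him.1, him.2]
            rw [if_pos htm, hfinal_m_eq hb2.1]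
          · rw [if_neg (fun hx => him ⟨hx.1, hx.2.2⟩)]
            rw [hcell i j hi hj]
            by_cases hij : i = r ∧ j = c
            · have hnt : ¬ pvTouched g.length r c i j = true := by
                rw [hij.1, hij.2]; intro h; exact hMD (hTa.mp h)
              rw [if_neg hnt, hij.1, hij.2, if_pos htrc, hfinal_rc_ne hb2.2]
            · rw [if_congr (hgen i j hi hj hij him) rfl rfl]
        · intro i j hj
          rw [pvGet2_pvSet2 _ _ _ _ _ _ hcm,
              if_neg (by rintro ⟨-, -, rfl⟩; omega)]
          exact hhigh i j hj
      · rw [if_neg hb2]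
        refine ⟨hlen, hrowlen, ?_, hhigh⟩
        intro i j hi hj
        rw [hcell i j hi hj]
        by_cases hij : i = r ∧ j = c
        · have hnt : ¬ pvTouched g.length r c i j = true := by
            rw [hij.1, hij.2]; intro h; exact hMD (hTa.mp h)
          rw [if_neg hnt, hij.1, hij.2, if_pos htrc]
          by_cases hne : (g.getD r []).getD c 0 = bg
          · -- both (r,c) and its mirror hold bg: the final value is bg as well
            have hmb : (g.getD (g.length - 1 - c) []).getD (g.length - 1 - r) 0 = bg := by
              by_contra hx; exact hb1 ⟨hne, hx⟩
            rw [hfinal_rc_eq hne, hmb, hne]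
          · rw [hfinal_rc_ne hne]
        · by_cases him : i = g.length - 1 - c ∧ j = g.length - 1 - r
          · have hnt : ¬ pvTouched g.length r c i j = true := by
              rw [him.1, him.2]; intro h; exact hMD (hTb.mp h)
            rw [if_neg hnt, him.1, him.2, if_pos htm]
            by_cases hne : (g.getD (g.length - 1 - c) []).getD (g.length - 1 - r) 0 = bg
            · have hrb : (g.getD r []).getD c 0 = bg := by
                by_contra hx; exact hb2 ⟨hne, hx⟩
              rw [hfinal_m_eq hne, hrb, hne]
            · rw [hfinal_m_ne hne]
          · rw [if_congr (hgen i j hi hj hij him) rfl rfl]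

theorem pvInner_inv (g : List (List Int)) (bg : Int)
    (hrows : ∀ i, i < g.length → g.length ≤ ((g.getD i []) : List Int).length)
    (r : Nat) (hr : r < g.length) :
    ∀ (k c : Nat) (res : List (List Int)), c + k = g.length → pvInv g bg r c res →
      pvInv g bg r g.length
        ((List.range' c k).foldl (fun res c => pvStep bg g.length g.length res r c) res) := by
  intro k
  induction k with
  | zero =>
    intro c res hck h
    simp only [List.range'_zero, List.foldl_nil]
    rwa [(by omega : c = g.length)] at h
  | succ k ih =>
    intro c res hck h
    rw [List.range'_succ, List.foldl_cons]
    exact ih (c + 1) _ (by omega) (pvStep_inv g bg hrows r c hr (by omega) res h)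

theorem pvInv_next (g : List (List Int)) (bg : Int) (r : Nat) (res : List (List Int))
    (h : pvInv g bg r g.length res) : pvInv g bg (r + 1) 0 res := by
  obtain ⟨hlen, hrowlen, hcell, hhigh⟩ := h
  refine ⟨hlen, hrowlen, ?_, hhigh⟩
  intro i j hi hj
  rw [if_congr (pvTouched_row_end g.length r i j hj) rfl rfl]
  exact hcell i j hi hj

theorem pvOuter_inv (g : List (List Int)) (bg : Int)
    (hrows : ∀ i, i < g.length → g.length ≤ ((g.getD i []) : List Int).length) :
    ∀ (k r : Nat) (res : List (List Int)), r + k = g.length → pvInv g bg r 0 res →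
      pvInv g bg g.length 0
        ((List.range' r k).foldl
          (fun res r => (List.range g.length).foldl (fun res c => pvStep bg g.length g.length res r c) res) res) := by
  intro k
  induction k with
  | zero =>
    intro r res hrk h
    simp only [List.range'_zero, List.foldl_nil]
    rwa [(by omega : r = g.length)] at h
  | succ k ih =>
    intro r res hrk h
    rw [List.range'_succ, List.foldl_cons]
    refine ih (r + 1) _ (by omega) ?_
    refine pvInv_next g bg r _ ?_
    rw [List.range_eq_range']
    exact pvInner_inv g bg hrows r (by omega) g.length 0 res (by omega) h

theorem pvInv_init (g : List (List Int)) (bg : Int) : pvInv g bg 0 0 g := by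
  refine ⟨rfl, fun i => rfl, ?_, fun i j hj => rfl⟩
  intro i j hi hj
  rw [if_neg (pvTouched_zero g.length i j)]
  rfl

theorem pvCopy_eq (g : List (List Int)) : pvCopy g = g := by
  simp [pvCopy, pysem]

-- B's output, written over List.range with Nat indices
theorem pvAlt_char (g : List (List Int)) (hs : g.length = (g.headI).length) :
    sym_diag_anti_alt g = (List.range g.length).map (fun (r : Nat) =>
      (List.range ((g.getD r []) : List Int).length).map (fun (j : Nat) =>
        if g.length ≤ j ∨ (g.getD r []).getD j 0 ≠ pvBg g then (g.getD r []).getD j 0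
        else (g.getD (g.length - 1 - j) []).getD (g.length - 1 - r) 0)) := by
  simp only [sym_diag_anti_alt, pvBg]
  rw [if_neg (by simp [hs])]
  rw [pv_map_enum ([] : List Int)]
  apply List.map_congr_left
  intro r hr
  rw [pv_map_enum (0 : Int)]
  apply List.map_congr_left
  intro j hj
  simp only [zero_add, Int.toNat_natCast]
  congr 1
  simp [Nat.cast_le]

theorem sym_diag_anti_eq_of_square (g : List (List Int)) (hs : g.length = (g.headI).length)
    (hrows : ∀ row ∈ g, g.length ≤ row.length) :
    sym_diag_anti g = sym_diag_anti_alt g := by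
  have hrows' : ∀ i, i < g.length → g.length ≤ ((g.getD i []) : List Int).length := by
    intro i hi
    rw [List.getD_eq_getElem _ _ hi]
    exact hrows _ (List.getElem_mem hi)
  have hA : sym_diag_anti g =
      (List.range g.length).foldl
        (fun res r => (List.range g.length).foldl (fun res c => pvStep (pvBg g) g.length g.length res r c) res) g := by
    simp only [sym_diag_anti]
    rw [if_neg (by simp [hs]), ← hs, pvCopy_eq]
  have hInv : pvInv g (pvBg g) g.length 0
      ((List.range g.length).foldl
        (fun res r => (List.range g.length).foldl (fun res c => pvStep (pvBg g) g.length g.length res r c) res) g) := by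
    have h0 := pvOuter_inv g (pvBg g) hrows' g.length 0 g (by omega) (pvInv_init g (pvBg g))
    rwa [← List.range_eq_range'] at h0
  rw [hA, pvAlt_char g hs]
  obtain ⟨hlen, hrowlen, hcell, hhigh⟩ := hInv
  apply List.ext_getElem
  · simp [hlen]
  · intro r h1 h2
    have hrn : r < g.length := by simpa using h2
    rw [List.getElem_map, List.getElem_range]
    apply List.ext_getElem
    · rw [List.length_map, List.length_range, ← List.getD_eq_getElem _ ([] : List Int) h1, hrowlen]
    · intro j hj1 hj2
      rw [List.getElem_map, List.getElem_range]
      rw [← List.getD_eq_getElem _ (0 : Int), ← List.getD_eq_getElem _ ([] : List Int) h1]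
      show pvGet2 _ r j = _
      by_cases hjn : j < g.length
      · rw [hcell r j hrn hjn, if_pos (pvTouched_done g.length r j hrn),
            if_congr (or_iff_right (Nat.not_le_of_lt hjn)) rfl rfl]
        unfold pvFinal
        rfl
      · rw [hhigh r j (by omega), if_pos (Or.inl (by omega))]

-- ===== VERDICT (by name: the statement is the Claim_ definition above) =====
theorem sym_diag_anti_spec : Claim_equal_sym_diag_anti := by
  intro g _ hpre
  unfold Spec_sym_diag_anti
  obtain ⟨hne, hex, hsqr⟩ := hpre
  by_cases hs : g.length = (g.headI).length
  · exact sym_diag_anti_eq_of_square g hs (hsqr hs)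
  · simp only [sym_diag_anti, sym_diag_anti_alt]
    rw [if_pos hs, if_pos hs]
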